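-- pv_equiv track=rewrite | github.com/nikki-nikitha17/Softiescripts | vijay.py | find_min_toggles
-- ===== SOURCE A (Python) =====
-- digits = {
--     ' _ | ||_|': '0',
--     '     |  |': '1',
--     ' _  _||_ ': '2',
--     ' _  _| _|': '3',
--     '   |_|  |': '4',
--     ' _ |_  _|': '5',
--     ' _ |_ |_|': '6',
--     ' _   |  |': '7',
--     ' _ |_||_|': '8',
--     ' _ |_| _|': '9'
-- }
--
-- seg_map = {v: k for k, v in digits.items()}
--
-- def toggle_digit(cur):
--     idx = int(cur)
--     cur_seg = seg_map[cur]
--     mn = None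
--     for d, s in digits.items():
--         if s == cur:
--             continue
--         diff = sum(1 for a, b in zip(cur_seg, d) if a != b)
--         if diff == 1:
--             if mn is None or int(s) < int(mn):
--                 mn = s
--     return mn
--
-- def find_min_toggles(digits, K):
--     n = len(digits)
--     result = digits[:]
--     used = 0
--     for i in range(n):
--         mn = toggle_digit(result[i])
--         if used < K and mn is not None:
--             if int(mn) < int(result[i]):
--                 result[i] = mn
--                 used += 1
--     return result
-- ===== SOURCE B (Python) =====
-- # Threshold rewrite: instead of a running budget counter interleaved with
-- # replacement, B converts the budget into a single cutoff index (the end of the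
-- # shortest prefix containing min(max(K,0), #improvable) improvable digits) and
-- # then rebuilds the list in one stateless comprehension. _NEXT maps each digit
-- # to its smaller one-segment toggle (None = none exists); lookup of a non-digit
-- # display raises KeyError, as only digits are valid.
-- _NEXT = {'0': None, '1': None, '2': None, '3': None, '4': None,
--          '5': None, '6': '5', '7': '1', '8': '0', '9': '3'}
--
-- def find_min_toggles(digits, K):
--     quota = min(max(K, 0), sum(_NEXT[d] is not None for d in digits))
--     cut = 0
--     seen = 0
--     while seen < quota:
--         if _NEXT[digits[cut]] is not None:
--             seen += 1
--         cut += 1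
--     return [_NEXT[d] if i < cut and _NEXT[d] is not None else d
--             for i, d in enumerate(digits)]
-- ===== Notes on version B (the rewrite author's own statement) =====
-- stated objective: alternative
-- what changed: B replaces A's stateful guarded loop (per-element segment-pattern search plus a running 'used' budget) by a budget-to-threshold conversion: it counts improvable digits, turns min(max(K,0), count) into a single cutoff index via one scan, and rebuilds the list with one stateless comprehension keyed on index < cutoff.
import Mathlib
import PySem

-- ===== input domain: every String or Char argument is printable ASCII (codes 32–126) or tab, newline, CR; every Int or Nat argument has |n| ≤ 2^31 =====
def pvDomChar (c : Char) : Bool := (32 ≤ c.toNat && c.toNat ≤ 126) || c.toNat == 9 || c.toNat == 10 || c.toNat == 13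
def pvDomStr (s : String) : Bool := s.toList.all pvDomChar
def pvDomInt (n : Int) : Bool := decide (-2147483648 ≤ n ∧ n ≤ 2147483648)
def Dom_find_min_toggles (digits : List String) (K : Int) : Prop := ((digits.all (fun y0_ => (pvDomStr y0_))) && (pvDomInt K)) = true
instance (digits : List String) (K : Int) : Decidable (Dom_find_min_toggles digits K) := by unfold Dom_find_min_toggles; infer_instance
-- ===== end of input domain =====

-- B converts the budget into a single cutoff index and rebuilds the list with one
-- stateless pass; equivalence is proved on Pre_ (all elements are '0'..'9', where A does not raise).

-- ===== PORT A =====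
-- the module-level 'digits' dict, as an insertion-ordered association list
def pvDigitsTable : List (String × String) :=
  [(" _ | ||_|", "0"), ("     |  |", "1"), (" _  _||_ ", "2"), (" _  _| _|", "3"),
   ("   |_|  |", "4"), (" _ |_  _|", "5"), (" _ |_ |_|", "6"), (" _   |  |", "7"),
   (" _ |_||_|", "8"), (" _ |_| _|", "9")]

-- seg_map = {v: k for k, v in digits.items()}
def pvSegMap : PySem.Dict String String :=
  PySem.Dict.ofList (pvDigitsTable.map (fun kv => (kv.2, kv.1)))

-- int(s); total via getD 0 — exact on Pre_ (every string fed to it is a decimal digit)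
def pvInt (s : String) : Int := (PySem.Int.ofStr? s).getD 0

def toggle_digit (cur : String) : Option String :=
  -- idx = int(cur) is computed and unused in A; ValueError is excluded by Pre_
  let cur_seg := PySem.Dict.getD pvSegMap cur ""   -- seg_map[cur]; KeyError excluded by Pre_
  pvDigitsTable.foldl (fun mn ds =>
    if ds.2 = cur then mn
    else
      let diff := ((cur_seg.toList.zip ds.1.toList).filter (fun ab => ab.1 ≠ ab.2)).length
      if diff = 1 then
        match mn with
        | none => some ds.2
        | some m => if pvInt ds.2 < pvInt m then some ds.2 else mn
      else mn) none

-- one iteration of A's 'for i in range(n)' loop body, state = (result, used)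
def pvStepA (K : Int) (st : List String × Int) (i : Int) : List String × Int :=
  let cur := PySem.List.pyGetD st.1 i ""          -- result[i]; i is always in range
  match toggle_digit cur with
  | some m =>
      if st.2 < K then
        if pvInt m < pvInt cur then (PySem.List.pySetD st.1 i m, st.2 + 1) else st
      else st
  | none => st

def find_min_toggles (digits : List String) (K : Int) : List String :=
  let n := PySem.List.len digits
  let result := PySem.List.slice digits none none   -- digits[:]
  ((PySem.List.pyRange 0 n 1).foldl (pvStepA K) (result, 0)).1

-- ===== PORT B =====
-- _NEXT = {'0': None, ..., '6': '5', '7': '1', '8': '0', '9': '3'}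
def pvNextB : PySem.Dict String (Option String) :=
  PySem.Dict.ofList [("0", none), ("1", none), ("2", none), ("3", none), ("4", none),
    ("5", none), ("6", some "5"), ("7", some "1"), ("8", some "0"), ("9", some "3")]

-- _NEXT[d]; total via getD none — KeyError is excluded by Pre_
def pvLook (d : String) : Option String := (PySem.Dict.get? pvNextB d).getD none

-- the 'while seen < quota: … cut += 1' scan, as the obvious structural recursion
-- over the list being indexed (list exhaustion with quota left is unreachable,
-- since quota never exceeds the number of improvable digits)
def pvCutScan (l : List String) (q : Int) : Int :=
  match l with
  | [] => 0
  | d :: ds =>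
    if 0 < q then
      (if (pvLook d).isSome then 1 + pvCutScan ds (q - 1) else 1 + pvCutScan ds q)
    else 0

def find_min_toggles_alt (digits : List String) (K : Int) : List String :=
  -- quota = min(max(K, 0), sum(_NEXT[d] is not None for d in digits))
  let quota := min (max K 0)
    (digits.foldl (fun a d => a + (if (pvLook d).isSome then (1:Int) else 0)) 0)
  let cut := pvCutScan digits quota
  -- [_NEXT[d] if i < cut and _NEXT[d] is not None else d for i, d in enumerate(digits)]
  (PySem.List.enumerate digits 0).map (fun p =>
    if p.1 < cut ∧ (pvLook p.2).isSome then (pvLook p.2).getD p.2 else p.2)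

-- ===== PRECONDITION & SPEC =====
def pvValid : List String := ["0", "1", "2", "3", "4", "5", "6", "7", "8", "9"]

-- Pre_ excludes exactly the inputs on which A raises: toggle_digit is applied to every
-- element, so A raises (ValueError/KeyError) iff some element is not one of '0'..'9'.
def Pre_find_min_toggles (digits : List String) (K : Int) : Prop :=
  ∀ x ∈ digits, x ∈ pvValid
instance (digits : List String) (K : Int) : Decidable (Pre_find_min_toggles digits K) := by
  unfold Pre_find_min_toggles; infer_instance

def pvWitness_find_min_toggles : List String × Int := (["8", "3", "7"], 1)

def Spec_find_min_toggles (digits : List String) (K : Int) (out : List String) : Prop :=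
  out = find_min_toggles_alt digits K
instance (digits : List String) (K : Int) (out : List String) : Decidable (Spec_find_min_toggles digits K out) := by
  unfold Spec_find_min_toggles; infer_instance

-- ===== CLAIM (what is proved, stated in full; the proofs are below) =====
def Claim_equal_find_min_toggles : Prop := ∀ (digits : List String) (K : Int), Dom_find_min_toggles digits K → Pre_find_min_toggles digits K → Spec_find_min_toggles digits K (find_min_toggles digits K)

-- ===== LEMMAS AND PROOFS =====

-- common form both programs are reduced to: walk the list with a remaining budget b,
-- replacing an element by its table entry while 0 < b
def pvApply (l : List String) (b : Int) : List String :=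
  match l with
  | [] => []
  | x :: xs =>
    match pvLook x with
    | some m => if 0 < b then m :: pvApply xs (b - 1) else x :: pvApply xs b
    | none => x :: pvApply xs b

-- number of improvable digits, recursively
def pvCnt : List String → Int
  | [] => 0
  | d :: ds => (if (pvLook d).isSome then 1 else 0) + pvCnt ds

theorem pvCnt_nonneg (l : List String) : 0 ≤ pvCnt l := by
  induction l with
  | nil => simp [pvCnt]
  | cons d ds ih => unfold pvCnt; split_ifs <;> omega

theorem pvCnt_foldl (l : List String) : ∀ a : Int,
    l.foldl (fun a d => a + (if (pvLook d).isSome then (1:Int) else 0)) a = a + pvCnt l := by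
  induction l with
  | nil => intro a; simp [pvCnt]
  | cons d ds ih => intro a; rw [List.foldl_cons, ih]; simp only [pvCnt]; ring

theorem pvApply_cons_none {x : String} {xs : List String} {b : Int}
    (h : pvLook x = none) :
    pvApply (x :: xs) b = x :: pvApply xs b := by
  conv_lhs => rw [pvApply]
  rw [h]

theorem pvApply_cons_some {x m : String} {xs : List String} {b : Int}
    (h : pvLook x = some m) :
    pvApply (x :: xs) b = if 0 < b then m :: pvApply xs (b - 1) else x :: pvApply xs b := by
  conv_lhs => rw [pvApply]
  rw [h]

-- per-digit agreement of A's decision with B's table (10 literal cases)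
theorem pv_table_facts : ∀ x ∈ pvValid,
    pvLook x
      = (toggle_digit x).bind (fun m => if pvInt m < pvInt x then some m else none) := by
  decide

theorem pv_set_append (pre xs : List String) (x m : String) :
    (pre ++ x :: xs).set pre.length m = pre ++ m :: xs := by
  induction pre with
  | nil => rfl
  | cons a t ih => simp [ih]

theorem pvApply_of_nonpos (xs : List String) (b : Int) (hb : b ≤ 0) :
    pvApply xs b = xs := by
  induction xs generalizing b with
  | nil => rfl
  | cons x t ih =>
    unfold pvApply
    cases pvLook x with
    | none => simp [ih b hb]
    | some m => simp [if_neg (by omega : ¬ (0:Int) < b), ih b hb]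

-- unfolding equations for the cutoff scan, plus its nonnegativity
theorem pvCutScan_cons (d : String) (ds : List String) (q : Int) :
    pvCutScan (d :: ds) q
      = if 0 < q then
          (if (pvLook d).isSome then 1 + pvCutScan ds (q - 1) else 1 + pvCutScan ds q)
        else 0 := rfl

theorem pvCutScan_nonneg (l : List String) : ∀ q : Int, 0 ≤ pvCutScan l q := by
  induction l with
  | nil => intro q; simp [pvCutScan]
  | cons d ds ih =>
    intro q
    rw [pvCutScan_cons]
    have h1 := ih (q - 1); have h2 := ih q
    split_ifs <;> omega

-- a budget at least the number of improvable digits acts like any other such budget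
theorem pvApply_of_ge (l : List String) : ∀ b c : Int, pvCnt l ≤ b → pvCnt l ≤ c →
    pvApply l b = pvApply l c := by
  induction l with
  | nil => intro b c _ _; rfl
  | cons x xs ih =>
    intro b c hb hc
    have hxs := pvCnt_nonneg xs
    cases hx : pvLook x with
    | none =>
      simp only [pvCnt, hx, Option.isSome_none] at hb hc
      simp only [Bool.false_eq_true, if_false, zero_add] at hb hc
      rw [pvApply_cons_none hx, pvApply_cons_none hx, ih b c hb hc]
    | some m =>
      simp only [pvCnt, hx, Option.isSome_some, if_true] at hb hc
      rw [pvApply_cons_some hx, pvApply_cons_some hx,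
        if_pos (by omega : (0:Int) < b), if_pos (by omega : (0:Int) < c),
        ih (b - 1) (c - 1) (by omega) (by omega)]

-- A's loop over the remaining suffix equals pvApply with remaining budget K - used
theorem pv_loopA (K : Int) :
    ∀ (suf pre : List String) (used p : Int), p = (pre.length : Int) →
      (∀ x ∈ suf, x ∈ pvValid) →
      ((PySem.List.pyRange p (p + (suf.length : Int)) 1).foldl
          (pvStepA K) (pre ++ suf, used)).1
        = pre ++ pvApply suf (K - used) := by
  intro suf
  induction suf with
  | nil =>
    intro pre used p hp _
    simp only [List.length_nil, Nat.cast_zero, add_zero, List.append_nil]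
    rw [PySem.List.pyRange_one_eq_nil le_rfl]
    simp [pvApply]
  | cons x xs ih =>
    intro pre used p hp hval
    have hx := hval x (List.mem_cons_self)
    have hxs : ∀ y ∈ xs, y ∈ pvValid := fun y hy => hval y (List.mem_cons_of_mem _ hy)
    have hlen : p + ((x :: xs).length : Int) = (p + 1) + (xs.length : Int) := by
      simp only [List.length_cons]; push_cast; ring
    have hcons : PySem.List.pyRange p (p + 1 + (xs.length : Int)) 1
        = p :: PySem.List.pyRange (p + 1) (p + 1 + (xs.length : Int)) 1 :=
      PySem.List.pyRange_one_cons (by omega)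
    rw [hlen, hcons, List.foldl_cons]
    have hcur : PySem.List.pyGetD (pre ++ x :: xs) p "" = x := by
      have h := PySem.List.pyGet?_append_length (pre := pre) (y := x) (ys := xs)
      subst hp
      simp only [PySem.List.pyGet?_natCast] at h
      simp [PySem.List.pyGetD_natCast, List.getD]
    have hp' : p + 1 = (((pre ++ [x]).length : Nat) : Int) := by simp; omega
    have hfact := pv_table_facts x hx
    cases htog : toggle_digit x with
    | none =>
      rw [htog] at hfact
      simp only [Option.bind_none] at hfact
      have hstep : pvStepA K (pre ++ x :: xs, used) p = (pre ++ x :: xs, used) := by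
        unfold pvStepA; simp [hcur, htog]
      rw [hstep]
      have := ih (pre ++ [x]) used (p + 1) hp' hxs
      simp only [List.append_assoc, List.cons_append, List.nil_append] at this
      rw [this, pvApply_cons_none hfact]
    | some m =>
      rw [htog] at hfact
      simp only [Option.bind_some] at hfact
      by_cases hK : used < K
      · by_cases hlt : pvInt m < pvInt x
        · -- replacement fires
          rw [if_pos hlt] at hfact
          have hstep : pvStepA K (pre ++ x :: xs, used) p
              = (pre ++ m :: xs, used + 1) := by
            unfold pvStepA
            simp only [hcur, htog, if_pos hK, if_pos hlt]
            subst hp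
            rw [PySem.List.pySetD_natCast, pv_set_append]
          rw [hstep]
          have := ih (pre ++ [m]) (used + 1) (p + 1) (by simp; omega) hxs
          simp only [List.append_assoc, List.cons_append, List.nil_append] at this
          rw [this, pvApply_cons_some hfact, if_pos (by omega : (0:Int) < K - used),
            (by omega : K - (used + 1) = K - used - 1)]
        · rw [if_neg hlt] at hfact
          have hstep : pvStepA K (pre ++ x :: xs, used) p = (pre ++ x :: xs, used) := by
            unfold pvStepA
            simp only [hcur, htog, if_pos hK, if_neg hlt]
          rw [hstep]
          have := ih (pre ++ [x]) used (p + 1) hp' hxs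
          simp only [List.append_assoc, List.cons_append, List.nil_append] at this
          rw [this, pvApply_cons_none hfact]
      · -- budget exhausted
        have hstep : pvStepA K (pre ++ x :: xs, used) p = (pre ++ x :: xs, used) := by
          unfold pvStepA
          simp only [hcur, htog, if_neg hK]
        rw [hstep]
        have := ih (pre ++ [x]) used (p + 1) hp' hxs
        simp only [List.append_assoc, List.cons_append, List.nil_append] at this
        rw [this]
        have hb : K - used ≤ 0 := by omega
        rw [pvApply_of_nonpos _ _ hb, pvApply_of_nonpos _ _ hb]

-- when the cutoff lies at or before the current index, the map is the identity
theorem pv_map_id : ∀ (l : List String) (p cutv : Int), cutv ≤ p →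
    (PySem.List.enumerate l p).map (fun r =>
      if r.1 < cutv ∧ (pvLook r.2).isSome then (pvLook r.2).getD r.2 else r.2) = l := by
  intro l
  induction l with
  | nil => intro p cutv _; simp [PySem.List.enumerate_nil]
  | cons x xs ih =>
    intro p cutv h
    rw [PySem.List.enumerate_cons, List.map_cons]
    have hno : ¬(((p, x) : Int × String).1 < cutv ∧ (pvLook ((p, x) : Int × String).2).isSome = true) := by
      rintro ⟨hlt, -⟩
      exact absurd (show p < cutv from hlt) (by omega)
    rw [if_neg hno, ih (p + 1) cutv (by omega)]

-- B's threshold map equals pvApply with budget q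
theorem pv_mapCut : ∀ (l : List String) (p cutv q : Int), 0 ≤ q → q ≤ pvCnt l →
    cutv = p + pvCutScan l q →
    (PySem.List.enumerate l p).map (fun r =>
      if r.1 < cutv ∧ (pvLook r.2).isSome then (pvLook r.2).getD r.2 else r.2)
      = pvApply l q := by
  intro l
  induction l with
  | nil => intro p cutv q _ _ _; simp [PySem.List.enumerate_nil, pvApply]
  | cons x xs ih =>
    intro p cutv q hq0 hqc hcut
    rcases Int.lt_or_le 0 q with hpos | hnp
    · -- cutoff covers the head
      rw [PySem.List.enumerate_cons, List.map_cons]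
      cases hx : pvLook x with
      | none =>
        have hscan : pvCutScan (x :: xs) q = 1 + pvCutScan xs q := by
          rw [pvCutScan_cons, if_pos hpos, if_neg (by simp [hx])]
        have hqc' : q ≤ pvCnt xs := by
          simp only [pvCnt, hx, Option.isSome_none] at hqc
          simp only [Bool.false_eq_true, if_false, zero_add] at hqc
          exact hqc
        rw [if_neg (by rintro ⟨-, hs⟩; simp [hx] at hs)]
        rw [ih (p + 1) cutv q hq0 hqc' (by rw [hcut, hscan]; ring),
          pvApply_cons_none hx]
      | some m =>
        have hscan : pvCutScan (x :: xs) q = 1 + pvCutScan xs (q - 1) := by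
          rw [pvCutScan_cons, if_pos hpos, if_pos (by simp [hx])]
        have hscan0 := pvCutScan_nonneg xs (q - 1)
        have hqc' : q - 1 ≤ pvCnt xs := by
          simp only [pvCnt, hx, Option.isSome_some, if_true] at hqc
          omega
        rw [if_pos ⟨show p < cutv by rw [hcut, hscan]; omega, by simp [hx]⟩]
        simp only [show ((p, x) : Int × String).2 = x from rfl, hx, Option.getD_some]
        rw [ih (p + 1) cutv (q - 1) (by omega) hqc' (by rw [hcut, hscan]; ring),
          pvApply_cons_some hx, if_pos hpos]
    · -- no budget: cutoff is at p, nothing changes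
      have hq : q = 0 := by omega
      subst hq
      have hscan : pvCutScan (x :: xs) 0 = 0 := by rw [pvCutScan_cons]; simp
      rw [pv_map_id (x :: xs) p cutv (by rw [hcut, hscan]; omega),
        pvApply_of_nonpos _ _ le_rfl]

-- ===== VERDICT (by name: the statement is the Claim_ definition above) =====
theorem find_min_toggles_spec : Claim_equal_find_min_toggles := by
  intro digits K _ hpre
  unfold Spec_find_min_toggles find_min_toggles find_min_toggles_alt
  have hA := pv_loopA K digits [] 0 0 (by simp) hpre
  simp only [List.nil_append, zero_add] at hA
  rw [PySem.List.slice_none_none, PySem.List.len_eq, hA]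
  rw [pvCnt_foldl digits 0, zero_add]
  have hcnt := pvCnt_nonneg digits
  set q := min (max K 0) (pvCnt digits) with hqdef
  have hq0 : 0 ≤ q := by simp only [hqdef]; omega
  have hqc : q ≤ pvCnt digits := by simp only [hqdef]; omega
  have hB := pv_mapCut digits 0 (pvCutScan digits q) q hq0 hqc (by ring)
  rw [hB]
  -- pvApply digits (K - 0) = pvApply digits q
  rcases Int.lt_or_le K 0 with hK | hK
  · have hq : q = 0 := by simp only [hqdef]; omega
    rw [hq, pvApply_of_nonpos _ _ (by omega), pvApply_of_nonpos _ _ le_rfl]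
  · rcases Int.lt_or_le K (pvCnt digits) with h1 | h1
    · have hq : q = K := by simp only [hqdef]; omega
      rw [hq, (by ring : K - 0 = K)]
    · have hq : q = pvCnt digits := by simp only [hqdef]; omega
      rw [(by ring : K - 0 = K), hq, pvApply_of_ge digits K (pvCnt digits) h1 le_rfl]
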